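-- pv_equiv track=rewrite | github.com/uedaLabR/nanoDoc2 | nanoDoc2_2/preprocess/AdjustUtils.py | findMismatchInterval
-- ===== SOURCE A (Python) =====
-- def countmatch(g,r):
--
--     cnt = 0
--     for m in range(5):
--         if g[m] == r[m]:
--             cnt += 1
--     return cnt
--
-- def findMismatchInterval(gseq,readseq):
--
--     ml = []
--     l = min(len(gseq),len(readseq))
--     for n in range(l-5):
--         m = countmatch(gseq[n:n+5],readseq[n:n+5])
--         if m <= 2:
--             ml.append(n)
--         elif readseq[n+2] =='-':
--             ml.append(n)
--
--     return interval_extract(ml)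
--
-- def interval_extract(list):
--     if len(list) ==0:
--         return []
--
--     list = sorted(set(list))
--     range_start = previous_number = list[0]
--
--     for number in list[1:]:
--         if number == previous_number + 1:
--             previous_number = number
--         else:
--             yield [range_start+1, previous_number+4]
--             range_start = previous_number = number
--     yield [range_start+1, previous_number+4]
-- ===== SOURCE B (Python) =====
-- def countmatch(g, r):
--     cnt = 0
--     for m in range(5):
--         if g[m] == r[m]:
--             cnt += 1
--     return cnt
--
-- def findMismatchInterval(gseq, readseq):
--     # single pass: decide each index's flag and emit a run's interval as soon as it closes
--     def gen():
--         run_start = prev = None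
--         for n in range(min(len(gseq), len(readseq)) - 5):
--             if countmatch(gseq[n:n+5], readseq[n:n+5]) <= 2 or readseq[n+2] == '-':
--                 if prev is None:
--                     run_start = n
--                 elif n != prev + 1:
--                     yield [run_start + 1, prev + 4]
--                     run_start = n
--                 prev = n
--         if prev is not None:
--             yield [run_start + 1, prev + 4]
--     return gen()
-- ===== Notes on version B (the rewrite author's own statement) =====
-- stated objective: simpler
-- what changed: B replaces A's two-phase design (collect all flagged indices into a list, then sort/dedup and merge them in a separate generator loop) with a single pass over the window indices that maintains the current run's (run_start, prev) boundaries and emits each interval as soon as its run closes.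
import Mathlib
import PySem

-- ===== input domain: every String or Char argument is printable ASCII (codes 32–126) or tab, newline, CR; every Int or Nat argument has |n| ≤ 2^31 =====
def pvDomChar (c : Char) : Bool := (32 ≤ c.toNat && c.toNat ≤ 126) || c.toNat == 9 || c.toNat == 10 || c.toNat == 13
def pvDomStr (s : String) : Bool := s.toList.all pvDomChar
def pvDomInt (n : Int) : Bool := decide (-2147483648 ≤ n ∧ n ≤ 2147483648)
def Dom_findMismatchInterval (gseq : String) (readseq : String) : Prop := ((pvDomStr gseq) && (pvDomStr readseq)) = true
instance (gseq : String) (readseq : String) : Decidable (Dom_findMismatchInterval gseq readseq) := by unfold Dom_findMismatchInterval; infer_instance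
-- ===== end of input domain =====

-- B folds A's separate flagged-index collection and generator run-merge into one pass keeping run boundaries (objective: simpler; return value only — both are pure).

-- ===== PORT A =====
-- countmatch(g, r): count of positions m in range(5) with g[m] == r[m].
-- (A only calls it on slices of length exactly 5, so pyGet? is always some there.)
def pvCountmatch (g : List Char) (r : List Char) : Int :=
  (PySem.List.pyRange 0 5 1).foldl
    (fun cnt m => if PySem.List.pyGet? g m = PySem.List.pyGet? r m then cnt + 1 else cnt) 0

-- interval_extract's generator loop: range_start/previous_number over the tail
def pvIELoop : List Int → Int → Int → List (List Int)
  | [], rs, prev => [[rs + 1, prev + 4]]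
  | n :: rest, rs, prev =>
      if n = prev + 1 then pvIELoop rest rs n
      else [rs + 1, prev + 4] :: pvIELoop rest n n

-- interval_extract(list): [] on empty, else sorted(set(list)) then the merge loop
def pvIntervalExtract (xs : List Int) : List (List Int) :=
  if xs.length = 0 then []
  else
    match PySem.List.sorted (PySem.Set.ofList xs) (fun x => x) false with
    | [] => []   -- unreachable: sorted(set(xs)) of a nonempty xs is nonempty
    | x :: rest => pvIELoop rest x x

def findMismatchInterval (gseq : String) (readseq : String) : List (List Int) :=
  let g := gseq.toList
  let r := readseq.toList
  let l : Int := min (PySem.Str.len gseq) (PySem.Str.len readseq)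
  let ml := (PySem.List.pyRange 0 (l - 5) 1).foldl
    (fun ml n =>
      if pvCountmatch (PySem.List.slice g (some n) (some (n + 5)))
                      (PySem.List.slice r (some n) (some (n + 5))) ≤ 2 then ml ++ [n]
      else if PySem.List.pyGet? r (n + 2) = some '-' then ml ++ [n]
      else ml) ([] : List Int)
  pvIntervalExtract ml

-- ===== PORT B =====
-- one pass: state = (emitted intervals, current open run as some (run_start, prev))
def findMismatchInterval_alt (gseq : String) (readseq : String) : List (List Int) :=
  let g := gseq.toList
  let r := readseq.toList
  let st := (PySem.List.pyRange 0 (min (PySem.Str.len gseq) (PySem.Str.len readseq) - 5) 1).foldl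
    (fun (st : List (List Int) × Option (Int × Int)) n =>
      if pvCountmatch (PySem.List.slice g (some n) (some (n + 5)))
                      (PySem.List.slice r (some n) (some (n + 5))) ≤ 2
         ∨ PySem.List.pyGet? r (n + 2) = some '-' then
        match st.2 with
        | none => (st.1, some (n, n))
        | some (rs, prev) =>
            if n = prev + 1 then (st.1, some (rs, n))
            else (st.1 ++ [[rs + 1, prev + 4]], some (n, n))
      else st) (([], none) : List (List Int) × Option (Int × Int))
  match st.2 with
  | none => st.1
  | some (rs, prev) => st.1 ++ [[rs + 1, prev + 4]]

-- ===== PRECONDITION & SPEC =====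
def Spec_findMismatchInterval (gseq : String) (readseq : String) (out : List (List Int)) : Prop := out = findMismatchInterval_alt gseq readseq
instance (gseq : String) (readseq : String) (out : List (List Int)) : Decidable (Spec_findMismatchInterval gseq readseq out) := by unfold Spec_findMismatchInterval; infer_instance

-- ===== CLAIM (what is proved, stated in full; the proofs are below) =====
def Claim_equal_findMismatchInterval : Prop := ∀ (gseq : String) (readseq : String), Dom_findMismatchInterval gseq readseq → Spec_findMismatchInterval gseq readseq (findMismatchInterval gseq readseq)

-- ===== LEMMAS AND PROOFS =====

-- proof-only names for B's fold step and finalizer (definitionally the lambdas in the port)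
def pvStep (st : List (List Int) × Option (Int × Int)) (n : Int) : List (List Int) × Option (Int × Int) :=
  match st.2 with
  | none => (st.1, some (n, n))
  | some (rs, prev) =>
      if n = prev + 1 then (st.1, some (rs, n))
      else (st.1 ++ [[rs + 1, prev + 4]], some (n, n))

def pvFin (st : List (List Int) × Option (Int × Int)) : List (List Int) :=
  match st.2 with
  | none => st.1
  | some (rs, prev) => st.1 ++ [[rs + 1, prev + 4]]

lemma pvStep_some (out : List (List Int)) (rs prev n : Int) :
    pvStep (out, some (rs, prev)) n =
      if n = prev + 1 then (out, some (rs, n)) else (out ++ [[rs + 1, prev + 4]], some (n, n)) := rfl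

-- B's run-merge fold with an open run equals interval_extract's generator loop
lemma pv_loop_eq (rest : List Int) : ∀ (rs prev : Int) (out : List (List Int)),
    pvFin (rest.foldl pvStep (out, some (rs, prev))) = out ++ pvIELoop rest rs prev := by
  induction rest with
  | nil => intro rs prev out; simp [pvFin, pvIELoop]
  | cons n rest ih =>
      intro rs prev out
      rw [List.foldl_cons, pvStep_some]
      by_cases h : n = prev + 1
      · rw [if_pos h, ih]
        simp [pvIELoop, h]
      · rw [if_neg h, ih]
        simp [pvIELoop, h]

-- the whole equivalence, over the underlying character lists
lemma pv_main (g r : List Char) (l : Int) :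
    pvIntervalExtract ((PySem.List.pyRange 0 (l - 5) 1).foldl
      (fun ml n =>
        if pvCountmatch (PySem.List.slice g (some n) (some (n + 5)))
                        (PySem.List.slice r (some n) (some (n + 5))) ≤ 2 then ml ++ [n]
        else if PySem.List.pyGet? r (n + 2) = some '-' then ml ++ [n]
        else ml) ([] : List Int))
    = pvFin ((PySem.List.pyRange 0 (l - 5) 1).foldl
      (fun st n =>
        if pvCountmatch (PySem.List.slice g (some n) (some (n + 5)))
                        (PySem.List.slice r (some n) (some (n + 5))) ≤ 2
           ∨ PySem.List.pyGet? r (n + 2) = some '-' then pvStep st n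
        else st) (([], none) : List (List Int) × Option (Int × Int))) := by
  have hcg : ∀ n ∈ PySem.List.pyRange 0 (l - 5) 1, ∀ (ml : List Int),
      (if pvCountmatch (PySem.List.slice g (some n) (some (n + 5)))
                      (PySem.List.slice r (some n) (some (n + 5))) ≤ 2 then ml ++ [n]
       else if PySem.List.pyGet? r (n + 2) = some '-' then ml ++ [n]
       else ml)
      = (if pvCountmatch (PySem.List.slice g (some n) (some (n + 5)))
                        (PySem.List.slice r (some n) (some (n + 5))) ≤ 2
           ∨ PySem.List.pyGet? r (n + 2) = some '-' then ml ++ [n] else ml) := by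
    intro n _ ml
    by_cases h1 : pvCountmatch (PySem.List.slice g (some n) (some (n + 5)))
                      (PySem.List.slice r (some n) (some (n + 5))) ≤ 2
    · simp [h1]
    · by_cases h2 : PySem.List.pyGet? r (n + 2) = some '-' <;> simp [h1, h2]
  rw [PySem.List.foldl_congr_mem' _ _ _ _ hcg, PySem.List.foldl_append_ite_eq_filter,
      PySem.List.foldl_ite_eq_foldl_filter]
  have hpair : ((PySem.List.pyRange 0 (l - 5) 1).filter
      (fun n => decide (pvCountmatch (PySem.List.slice g (some n) (some (n + 5)))
                        (PySem.List.slice r (some n) (some (n + 5))) ≤ 2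
           ∨ PySem.List.pyGet? r (n + 2) = some '-'))).Pairwise (· < ·) :=
    List.Pairwise.filter _ (PySem.List.pairwise_lt_pyRange_one 0 (l - 5))
  rw [List.nil_append]
  generalize hsgen : (PySem.List.pyRange 0 (l - 5) 1).filter
      (fun n => decide (pvCountmatch (PySem.List.slice g (some n) (some (n + 5)))
                        (PySem.List.slice r (some n) (some (n + 5))) ≤ 2
           ∨ PySem.List.pyGet? r (n + 2) = some '-')) = s at hpair ⊢
  have hsort : PySem.List.sorted (PySem.Set.ofList s) (fun x => x) false = s := by
    have h1 : PySem.Set.ofList s = s := PySem.Set.ofList_eq_self_of_nodup s (hpair.imp (fun h => ne_of_lt h))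
    rw [h1]
    exact PySem.List.sorted_eq_self_of_pairwise s (fun x => x) (hpair.imp (fun h => le_of_lt h))
  cases s with
  | nil => simp [pvIntervalExtract, pvFin]
  | cons x rest =>
      unfold pvIntervalExtract
      rw [if_neg (by simp), hsort, List.foldl_cons]
      have h0 : pvStep (([], none) : List (List Int) × Option (Int × Int)) x = ([], some (x, x)) := rfl
      rw [h0, pv_loop_eq rest x x []]
      simp

-- ===== VERDICT (by name: the statement is the Claim_ definition above) =====
theorem findMismatchInterval_spec : Claim_equal_findMismatchInterval := by
  intro gseq readseq _
  unfold Spec_findMismatchInterval findMismatchInterval findMismatchInterval_alt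
  exact pv_main gseq.toList readseq.toList (min (PySem.Str.len gseq) (PySem.Str.len readseq))
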